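-- pv_equiv track=rewrite | github.com/SergioAle210/Generate-Lex | regex_transform.py | extract_operand
-- ===== SOURCE A (Python) =====
-- def extract_operand(expr: str, pos: int) -> (str, int):
--     """
--     Extracts the operand immediately preceding the position 'pos' in the expression.
--     Returns the operand and its starting position.
--
--     Handles both grouped operands (ending with ')') and single-character operands.
--     """
--     if pos <= 0:
--         return "", 0
--
--     # Check if the preceding character is a closing parenthesis
--     if expr[pos - 1] == ")":
--         # Find the matching opening parenthesis
--         balance = 1
--         start_pos = pos - 2
--         while start_pos >= 0 and balance > 0:
--             if expr[start_pos] == ")":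
--                 balance += 1
--             elif expr[start_pos] == "(":
--                 balance -= 1
--             start_pos -= 1
--
--         if start_pos < 0:
--             # Unbalanced parentheses, return empty
--             return "", 0
--
--         # Extract the operand including parentheses
--         operand = expr[start_pos+1:pos]
--
--         # Check if the operand is already an optional expression
--         if "|_)" in operand:
--             return operand, start_pos+1
--
--         # Remove redundant outer parentheses if needed
--         if operand.startswith("(") and operand.endswith(")"):
--             # Check if parentheses are balanced
--             inner_balance = 0
--             for char in operand[1:-1]:
--                 if char == "(":
--                     inner_balance += 1
--                 elif char == ")":
--                     inner_balance -= 1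
--                 if inner_balance < 0:
--                     break
--
--             # If balanced, remove outer parentheses
--             if inner_balance == 0:
--                 operand = operand[1:-1]
--
--         return operand, start_pos+1
--     else:
--         # Single character operand
--         return expr[pos-1:pos], pos-1
-- ===== SOURCE B (Python) =====
-- def _balanced(segment):
--     depth = 0
--     for ch in segment:
--         if ch == "(":
--             depth += 1
--         elif ch == ")":
--             depth -= 1
--             if depth < 0:
--                 return False
--     return depth == 0
--
--
-- def extract_operand(expr: str, pos: int) -> (str, int):
--     if pos <= 0:
--         return "", 0
--     if expr[pos - 1] != ")":
--         # Single character operand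
--         return expr[pos - 1:pos], pos - 1
--     # Forward pass over the prefix: stack of indices of '(' not yet matched
--     # inside expr[:pos-1]; its top is the '(' matching the ')' at pos-1.
--     stack = []
--     for i, ch in enumerate(expr[:pos - 1]):
--         if ch == "(":
--             stack.append(i)
--         elif ch == ")" and stack:
--             stack.pop()
--     if not stack:
--         # Unbalanced parentheses
--         return "", 0
--     start = stack[-1]
--     operand = expr[start:pos]
--     if "|_)" in operand:
--         return operand, start
--     if operand.startswith("(") and operand.endswith(")") and _balanced(operand[1:-1]):
--         operand = operand[1:-1]
--     return operand, start
-- ===== Notes on version B (the rewrite author's own statement) =====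
-- stated objective: alternative
-- what changed: Replaces A's backward balance-counter while-loop (scanning from pos-2 towards 0) with a single forward pass over expr[:pos-1] that maintains a stack of indices of unmatched '(' whose top is the match of the closing ')'; the inner-balance strip test is factored into a _balanced helper.
-- intended difference: When the '(' matching the ')' at pos-1 sits at index 0 (and pos != 2, where both yield ('',0)), A's 'start_pos < 0' check misreads the balanced group as unbalanced and returns ('',0); B returns the actual operand starting at index 0, which is the intended extraction. — e.g. on extract_operand("(ab)", 4): A returns ("", 0), B returns ("ab", 0)
import Mathlib
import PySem

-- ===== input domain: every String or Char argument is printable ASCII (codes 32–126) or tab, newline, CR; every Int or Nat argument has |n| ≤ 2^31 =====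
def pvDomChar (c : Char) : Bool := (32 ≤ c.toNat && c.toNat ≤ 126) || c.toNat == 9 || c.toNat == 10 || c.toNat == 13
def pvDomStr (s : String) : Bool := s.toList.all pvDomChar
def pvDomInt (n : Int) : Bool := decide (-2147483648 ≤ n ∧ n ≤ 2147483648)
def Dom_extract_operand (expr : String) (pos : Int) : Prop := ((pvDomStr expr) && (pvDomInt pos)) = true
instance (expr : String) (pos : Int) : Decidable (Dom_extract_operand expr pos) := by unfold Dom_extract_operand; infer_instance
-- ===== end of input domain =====

-- B replaces A's backward balance-counter scan (from pos-2 towards 0) by a single forward pass over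
-- expr[:pos-1] maintaining a stack of indices of unmatched '('; on the inputs of D_ below (matching
-- '(' at index 0) A wrongly reports "unbalanced" and B returns the operand (stated intended difference).

-- ===== PORT A =====
-- A's while loop: start_pos runs from pos-2 downwards, balance counts ')' minus '('.
-- expr[start_pos] is ported as s.getD j.toNat ' ' — exact under Pre_ (j < len whenever it is read).
def pvBackScan (s : List Char) (j : Int) (b : Int) : Int :=
  if h : 0 ≤ j ∧ 0 < b then
    pvBackScan s (j - 1)
      (if s.getD j.toNat ' ' = ')' then b + 1
       else if s.getD j.toNat ' ' = '(' then b - 1 else b)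
  else j
termination_by (j + 1).toNat
decreasing_by omega

-- A's inner for-loop over operand[1:-1] with its 'break' on a negative balance
def pvInnerBal : List Char → Int → Int
  | [], b => b
  | c :: rest, b =>
    let b' := if c = '(' then b + 1 else if c = ')' then b - 1 else b
    if b' < 0 then b' else pvInnerBal rest b'

def extract_operand (expr : String) (pos : Int) : String × Int :=
  if pos ≤ 0 then ("", 0)
  else
    let s := expr.toList
    if PySem.List.pyGetD s (pos - 1) ' ' = ')' then
      let start_pos := pvBackScan s (pos - 2) 1
      if start_pos < 0 then ("", 0)
      else
        let operand := PySem.List.slice s (some (start_pos + 1)) (some pos)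
        if PySem.Chars.isIn ['|', '_', ')'] operand then (String.ofList operand, start_pos + 1)
        else
          let operand2 :=
            if PySem.Chars.startswith operand ['('] && PySem.Chars.endswith operand [')'] then
              if pvInnerBal (PySem.List.slice operand (some 1) (some (-1))) 0 = 0 then
                PySem.List.slice operand (some 1) (some (-1))
              else operand
            else operand
          (String.ofList operand2, start_pos + 1)
    else
      (String.ofList (PySem.List.slice s (some (pos - 1)) (some pos)), pos - 1)

-- ===== PORT B =====
-- B's _balanced helper (early False on a negative depth)
def pvBalancedB : List Char → Int → Bool
  | [], d => d == 0
  | c :: rest, d =>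
    if c = '(' then pvBalancedB rest (d + 1)
    else if c = ')' then (if d - 1 < 0 then false else pvBalancedB rest (d - 1))
    else pvBalancedB rest d

-- one step of B's forward loop; the Python list used head-ward: push = cons, pop = tail, top = head
def pvStackStep (st : List Int) (ic : Int × Char) : List Int :=
  if ic.2 = '(' then ic.1 :: st
  else if ic.2 = ')' then st.tail
  else st

def extract_operand_alt (expr : String) (pos : Int) : String × Int :=
  if pos ≤ 0 then ("", 0)
  else
    let s := expr.toList
    if PySem.List.pyGetD s (pos - 1) ' ' ≠ ')' then
      (String.ofList (PySem.List.slice s (some (pos - 1)) (some pos)), pos - 1)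
    else
      let stack := (PySem.List.enumerate (PySem.List.slice s none (some (pos - 1)))).foldl pvStackStep []
      match stack with
      | [] => ("", 0)
      | top :: _ =>
        let operand := PySem.List.slice s (some top) (some pos)
        if PySem.Chars.isIn ['|', '_', ')'] operand then (String.ofList operand, top)
        else
          let operand2 :=
            if PySem.Chars.startswith operand ['('] && PySem.Chars.endswith operand [')'] &&
                pvBalancedB (PySem.List.slice operand (some 1) (some (-1))) 0 then
              PySem.List.slice operand (some 1) (some (-1))
            else operand
          (String.ofList operand2, top)

-- ===== PRECONDITION & SPEC =====
-- Pre_ excludes exactly pos > len(expr): there A's expr[pos - 1] raises IndexError.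
def Pre_extract_operand (expr : String) (pos : Int) : Prop := pos ≤ (expr.toList.length : Int)
instance (expr : String) (pos : Int) : Decidable (Pre_extract_operand expr pos) := by
  unfold Pre_extract_operand; infer_instance

def pvWitness_extract_operand : String × Int := ("a(b)", 4)

-- parenthesis balance (count of '(' minus count of ')'), used only to state D_
def pvNet (l : List Char) : Int := (l.count '(' : Int) - (l.count ')' : Int)

-- When the '(' matching the ')' at pos-1 sits at index 0 (and pos ≠ 2, where both yield ("",0)),
-- A's 'start_pos < 0' check misreads the balanced group as unbalanced and returns ("",0);
-- B returns the actual operand starting at index 0, which is the intended extraction.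
def D_extract_operand (expr : String) (pos : Int) : Prop :=
  0 < pos ∧ pos ≤ (expr.toList.length : Int) ∧ pos ≠ 2 ∧
  PySem.List.pyGetD expr.toList (pos - 1) ' ' = ')' ∧
  PySem.List.pyGetD expr.toList 0 ' ' = '(' ∧
  pvNet ((expr.toList.take (pos - 1).toNat).drop 1) = 0 ∧
  ∀ j ∈ List.range (((expr.toList.take (pos - 1).toNat).drop 1).length + 1),
    0 ≤ pvNet (((expr.toList.take (pos - 1).toNat).drop 1).take j)
instance (expr : String) (pos : Int) : Decidable (D_extract_operand expr pos) := by
  unfold D_extract_operand; infer_instance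

def Spec_extract_operand (expr : String) (pos : Int) (out : String × Int) : Prop :=
  ¬ D_extract_operand expr pos → out = extract_operand_alt expr pos
instance (expr : String) (pos : Int) (out : String × Int) : Decidable (Spec_extract_operand expr pos out) := by
  unfold Spec_extract_operand; infer_instance

def pvDiffWitness_extract_operand : String × Int := ("(ab)", 4)
def pvDiffWitnessOut_extract_operand : (String × Int) × (String × Int) := (("", 0), ("ab", 0))

-- ===== CLAIM (what is proved, stated in full; the proofs are below) =====
def Claim_unchanged_extract_operand : Prop := ∀ (expr : String) (pos : Int), Dom_extract_operand expr pos → Pre_extract_operand expr pos → Spec_extract_operand expr pos (extract_operand expr pos)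
def Claim_changed_extract_operand : Prop := Dom_extract_operand (pvDiffWitness_extract_operand.1) (pvDiffWitness_extract_operand.2) ∧ Pre_extract_operand (pvDiffWitness_extract_operand.1) (pvDiffWitness_extract_operand.2) ∧ D_extract_operand (pvDiffWitness_extract_operand.1) (pvDiffWitness_extract_operand.2) ∧ extract_operand (pvDiffWitness_extract_operand.1) (pvDiffWitness_extract_operand.2) = pvDiffWitnessOut_extract_operand.1 ∧ extract_operand_alt (pvDiffWitness_extract_operand.1) (pvDiffWitness_extract_operand.2) = pvDiffWitnessOut_extract_operand.2 ∧ pvDiffWitnessOut_extract_operand.1 ≠ pvDiffWitnessOut_extract_operand.2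
def Claim_exact_extract_operand : Prop := ∀ (expr : String) (pos : Int), Dom_extract_operand expr pos → Pre_extract_operand expr pos → D_extract_operand expr pos → extract_operand expr pos ≠ extract_operand_alt expr pos

-- ===== LEMMAS AND PROOFS =====

theorem pvNet_nil : pvNet [] = 0 := by simp [pvNet]

theorem pvNet_cons_open (r : List Char) : pvNet ('(' :: r) = 1 + pvNet r := by
  simp [pvNet, List.count_cons]
  omega

theorem pvNet_cons_close (r : List Char) : pvNet (')' :: r) = -1 + pvNet r := by
  simp [pvNet, List.count_cons]
  omega

theorem pvNet_cons_other (c : Char) (r : List Char) (h1 : c ≠ '(') (h2 : c ≠ ')') :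
    pvNet (c :: r) = pvNet r := by
  simp [pvNet, List.count_cons, h1, h2]

theorem pv_enumerate_append {α : Type} (l : List α) (x : α) (a : Int) :
    PySem.List.enumerate (l ++ [x]) a = PySem.List.enumerate l a ++ [(a + l.length, x)] := by
  induction l generalizing a with
  | nil => simp [PySem.List.enumerate_nil, PySem.List.enumerate_cons]
  | cons y ys ih =>
    simp [PySem.List.enumerate_cons, ih (a + 1)]
    ring_nf

-- the stack B builds over the first k characters
def pvStk (s : List Char) (k : Nat) : List Int :=
  (PySem.List.enumerate (s.take k)).foldl pvStackStep []

theorem pvStk_succ (s : List Char) (k : Nat) (hk : k < s.length) :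
    pvStk s (k + 1) = pvStackStep (pvStk s k) ((k : Int), s[k]) := by
  have ht : s.take (k + 1) = s.take k ++ [s[k]] := by
    rw [List.take_add_one]
    simp [List.getElem?_eq_getElem hk]
  rw [pvStk, ht, pv_enumerate_append, List.foldl_append]
  have h2 : (0 + ((s.take k).length : Int)) = (k : Int) := by
    simp [List.length_take, Nat.min_eq_left hk.le]
  simp only [List.foldl_cons, List.foldl_nil]
  rw [h2]
  rfl

theorem pvStk_nonneg (s : List Char) (k : Nat) : ∀ x ∈ pvStk s k, 0 ≤ x := by
  have H : ∀ (l : List Char) (a : Int) (st : List Int), 0 ≤ a → (∀ x ∈ st, 0 ≤ x) →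
      ∀ x ∈ (PySem.List.enumerate l a).foldl pvStackStep st, 0 ≤ x := by
    intro l
    induction l with
    | nil => intro a st _ hst; simpa [PySem.List.enumerate_nil] using hst
    | cons c cs ih =>
      intro a st ha hst
      rw [PySem.List.enumerate_cons]
      simp only [List.foldl_cons]
      refine ih (a + 1) _ (by omega) ?_
      intro x hx
      by_cases hc1 : c = '('
      · simp only [pvStackStep, hc1, if_true, if_pos rfl] at hx
        rcases List.mem_cons.1 hx with h | h
        · omega
        · exact hst x h
      · by_cases hc2 : c = ')'
        · simp only [pvStackStep, hc1, hc2, if_neg hc1, if_pos rfl] at hx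
          exact hst x (List.mem_of_mem_tail hx)
        · simp only [pvStackStep, if_neg hc1, if_neg hc2] at hx
          exact hst x hx
  exact H _ 0 [] le_rfl (by simp)

-- A's backward scan, expressed through B's stack: with balance b it stops just below the b-th
-- unmatched '(' from the top, and at -1 when there is none.
theorem pvBackScan_eq_stk (s : List Char) (k : Nat) (hk : k ≤ s.length) :
    ∀ b : Int, 1 ≤ b →
      pvBackScan s ((k : Int) - 1) b =
        (match (pvStk s k)[b.toNat - 1]? with
         | some t => t - 1
         | none => (-1 : Int)) := by
  induction k with
  | zero =>
    intro b hb
    rw [pvBackScan]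
    simp [pvStk]
  | succ k ih =>
    intro b hb
    have hklt : k < s.length := by omega
    have hstep := pvStk_succ s k hklt
    have hj : ((k + 1 : Nat) : Int) - 1 = (k : Int) := by push_cast; ring
    rw [hj, pvBackScan]
    have hcond : (0 ≤ (k : Int) ∧ 0 < b) := ⟨by positivity, by omega⟩
    rw [dif_pos hcond]
    have hgd : s.getD ((k : Int)).toNat ' ' = s[k] := by
      simp [List.getD_eq_getElem?_getD, List.getElem?_eq_getElem hklt]
    rw [hgd]
    by_cases hc1 : s[k] = ')'
    · rw [if_pos hc1]
      have : ((k : Int)) - 1 = ((k : Nat) : Int) - 1 := by norm_num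
      rw [this, ih (by omega) (b + 1) (by omega)]
      rw [hstep]
      unfold pvStackStep
      simp only [hc1]
      have hb1 : (b + 1).toNat - 1 = (b.toNat - 1) + 1 := by omega
      rw [hb1]
      cases hS : pvStk s k with
      | nil => simp
      | cons t rest =>
        simp only [List.tail_cons, List.getElem?_cons_succ]
        split
        · simp_all
        · simp_all
    · rw [if_neg hc1]
      by_cases hc2 : s[k] = '('
      · rw [if_pos hc2]
        rw [hstep]
        unfold pvStackStep
        simp only [hc2]
        by_cases hb1 : b = 1
        · subst hb1
          rw [pvBackScan]
          norm_num
        · have hb2 : 2 ≤ b := by omega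
          have : ((k : Int)) - 1 = ((k : Nat) : Int) - 1 := by norm_num
          rw [this, ih (by omega) (b - 1) (by omega)]
          have hi : b.toNat - 1 = ((b - 1).toNat - 1) + 1 := by omega
          rw [hi]
          simp [List.getElem?_cons_succ]
      · rw [if_neg hc2]
        have : ((k : Int)) - 1 = ((k : Nat) : Int) - 1 := by norm_num
        rw [this, ih (by omega) b (by omega)]
        rw [hstep]
        unfold pvStackStep
        simp [hc1, hc2]

-- A's break-loop test 'inner_balance == 0' agrees with B's _balanced helper
theorem pvBalancedB_eq_innerBal (l : List Char) : ∀ d : Int, 0 ≤ d →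
    (pvBalancedB l d = true ↔ pvInnerBal l d = 0) := by
  induction l with
  | nil => intro d _; simp [pvBalancedB, pvInnerBal]
  | cons c cs ih =>
    intro d hd
    by_cases h2 : c = ')'
    · subst h2
      by_cases h3 : d - 1 < 0
      · simp [pvBalancedB, pvInnerBal, h3]
        omega
      · simp [pvBalancedB, pvInnerBal, h3, ih (d - 1) (by omega)]
    · by_cases h1 : c = '('
      · subst h1
        simp [pvBalancedB, pvInnerBal, ih (d + 1) (by omega)]
        rw [if_neg (by omega : ¬ (d + 1 : Int) < 0)]
      · simp [pvBalancedB, pvInnerBal, h1, h2, ih d hd]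
        rw [if_neg (by omega : ¬ (d : Int) < 0)]

-- structural twin of B's fold, for induction over the characters
def pvStkF : List Char → Int → List Int → List Int
  | [], _, st => st
  | c :: r, a, st => pvStkF r (a + 1) (pvStackStep st (a, c))

theorem pv_foldl_enum_eq_stkF (l : List Char) : ∀ (a : Int) (st : List Int),
    (PySem.List.enumerate l a).foldl pvStackStep st = pvStkF l a st := by
  induction l with
  | nil => intro a st; simp [PySem.List.enumerate_nil, pvStkF]
  | cons c r ih =>
    intro a st
    rw [PySem.List.enumerate_cons]
    simp only [List.foldl_cons]
    exact ih (a + 1) _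

theorem pvStk_eq_stkF (s : List Char) (k : Nat) : pvStk s k = pvStkF (s.take k) 0 [] :=
  pv_foldl_enum_eq_stkF _ 0 []

-- every element of the stack comes from the initial stack or is a later index
theorem pvStkF_mem (l : List Char) : ∀ (a : Int) (st : List Int) (x : Int),
    x ∈ pvStkF l a st → x ∈ st ∨ a ≤ x := by
  induction l with
  | nil => intro a st x hx; exact Or.inl hx
  | cons c r ih =>
    intro a st x hx
    rcases ih (a + 1) _ x hx with h | h
    · by_cases hc1 : c = '('
      · simp only [pvStackStep, hc1, if_pos rfl] at h
        rcases List.mem_cons.1 h with h | h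
        · exact Or.inr (by omega)
        · exact Or.inl h
      · by_cases hc2 : c = ')'
        · simp only [pvStackStep, hc1, hc2, if_neg hc1, if_pos rfl] at h
          exact Or.inl (List.mem_of_mem_tail h)
        · simp only [pvStackStep, if_neg hc1, if_neg hc2] at h
          exact Or.inl h
    · exact Or.inr (by omega)

-- forward: a prefix-nonnegative segment only adds pvNet-many indices on top of the stack
theorem pvStkF_balanced (l : List Char) : ∀ (a : Int) (ex st : List Int),
    (∀ k : Nat, k ≤ l.length → -(ex.length : Int) ≤ pvNet (l.take k)) →
    ∃ ex' : List Int, pvStkF l a (ex ++ st) = ex' ++ st ∧ (ex'.length : Int) = ex.length + pvNet l := by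
  induction l with
  | nil =>
    intro a ex st _
    exact ⟨ex, rfl, by simp [pvNet_nil]⟩
  | cons c r ih =>
    intro a ex st h
    by_cases hc1 : c = '('
    · subst hc1
      have hstep : pvStackStep (ex ++ st) (a, '(') = (a :: ex) ++ st := by
        simp [pvStackStep]
      obtain ⟨ex', heq, hlen⟩ := ih (a + 1) (a :: ex) st (by
        intro k hk
        have := h (k + 1) (by simpa using hk)
        simp only [List.take_succ_cons, pvNet_cons_open] at this
        simp only [List.length_cons]
        push_cast
        omega)
      refine ⟨ex', by simpa [pvStkF, hstep] using heq, ?_⟩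
      simp only [pvNet_cons_open]
      simp only [List.length_cons] at hlen
      push_cast at hlen ⊢
      omega
    · by_cases hc2 : c = ')'
      · subst hc2
        have h1 : -(ex.length : Int) ≤ -1 := by
          simpa [pvNet_cons_close, pvNet_nil] using h 1 (by simp)
        cases ex with
        | nil => simp at h1
        | cons e ex₀ =>
          have hstep : pvStackStep ((e :: ex₀) ++ st) (a, ')') = ex₀ ++ st := by
            simp [pvStackStep]
          obtain ⟨ex', heq, hlen⟩ := ih (a + 1) ex₀ st (by
            intro k hk
            have := h (k + 1) (by simpa using hk)
            simp only [List.take_succ_cons, pvNet_cons_close] at this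
            simp only [List.length_cons] at this
            push_cast at this ⊢
            omega)
          refine ⟨ex', by simpa [pvStkF, hstep] using heq, ?_⟩
          simp only [pvNet_cons_close]
          simp only [List.length_cons]
          push_cast
          omega
      · have hstep : pvStackStep (ex ++ st) (a, c) = ex ++ st := by
          simp [pvStackStep, hc1, hc2]
        obtain ⟨ex', heq, hlen⟩ := ih (a + 1) ex st (by
          intro k hk
          have := h (k + 1) (by simpa using hk)
          simpa [List.take_succ_cons, pvNet_cons_other c _ hc1 hc2] using this)
        exact ⟨ex', by simpa [pvStkF, hstep] using heq, by simpa [pvNet_cons_other c _ hc1 hc2] using hlen⟩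

-- converse: if the sentinel 0 is still on top at the end, the segment was balanced
theorem pvStkF_zero_head (l : List Char) : ∀ (a : Int) (ex rest : List Int),
    0 < a → (∀ x ∈ ex, 0 < x) →
    pvStkF l a (ex ++ [0]) = 0 :: rest →
    (ex.length : Int) + pvNet l = 0 ∧
      ∀ k : Nat, k ≤ l.length → 0 ≤ (ex.length : Int) + pvNet (l.take k) := by
  induction l with
  | nil =>
    intro a ex rest _ hex h
    simp only [pvStkF] at h
    cases ex with
    | nil =>
      refine ⟨by simp [pvNet_nil], ?_⟩
      intro k hk
      have hk0 : k = 0 := Nat.le_zero.mp (by simpa using hk)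
      subst hk0
      simp [pvNet_nil]
    | cons e ex₀ =>
      simp only [List.cons_append, List.cons.injEq] at h
      exact absurd h.1 (by have := hex e (List.mem_cons_self ..); omega)
  | cons c r ih =>
    intro a ex rest ha hex h
    by_cases hc1 : c = '('
    · subst hc1
      have hstep : pvStackStep (ex ++ [0]) (a, '(') = (a :: ex) ++ [(0 : Int)] := by
        simp [pvStackStep]
      simp only [pvStkF, hstep] at h
      obtain ⟨h1, h2⟩ := ih (a + 1) (a :: ex) rest (by omega)
        (by
          intro x hx
          rcases List.mem_cons.1 hx with h | h
          · omega
          · exact hex x h) h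
      simp only [List.length_cons] at h1 h2
      refine ⟨by simp only [pvNet_cons_open]; push_cast at h1 ⊢; omega, ?_⟩
      intro k hk
      cases k with
      | zero => simp [pvNet_nil]; try positivity
      | succ k =>
        have := h2 k (by simpa using hk)
        simp only [List.take_succ_cons, pvNet_cons_open]
        push_cast at this ⊢
        omega
    · by_cases hc2 : c = ')'
      · subst hc2
        cases ex with
        | nil =>
          have hstep : pvStackStep ([] ++ [(0 : Int)]) (a, ')') = [] := by
            simp [pvStackStep]
          simp only [pvStkF, hstep] at h
          have : (0 : Int) ∈ pvStkF r (a + 1) [] := by rw [h]; exact List.mem_cons_self ..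
          rcases pvStkF_mem r (a + 1) [] 0 this with h' | h'
          · exact absurd h' (List.not_mem_nil)
          · omega
        | cons e ex₀ =>
          have hstep : pvStackStep ((e :: ex₀) ++ [(0 : Int)]) (a, ')') = ex₀ ++ [(0 : Int)] := by
            simp [pvStackStep]
          simp only [pvStkF, hstep] at h
          obtain ⟨h1, h2⟩ := ih (a + 1) ex₀ rest (by omega)
            (by intro x hx; exact hex x (List.mem_cons_of_mem _ hx)) h
          refine ⟨by simp only [pvNet_cons_close, List.length_cons]; push_cast at h1 ⊢; omega, ?_⟩
          intro k hk
          cases k with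
          | zero => simp [pvNet_nil]; try positivity
          | succ k =>
            have := h2 k (by simpa using hk)
            simp only [List.take_succ_cons, pvNet_cons_close, List.length_cons]
            push_cast at this ⊢
            omega
      · have hstep : pvStackStep (ex ++ [(0 : Int)]) (a, c) = ex ++ [(0 : Int)] := by
          simp [pvStackStep, hc1, hc2]
        simp only [pvStkF, hstep] at h
        obtain ⟨h1, h2⟩ := ih (a + 1) ex rest (by omega) hex h
        refine ⟨by simpa [pvNet_cons_other c _ hc1 hc2] using h1, ?_⟩
        intro k hk
        cases k with
        | zero => simp [pvNet_nil]; try positivity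
        | succ k =>
          have := h2 k (by simpa using hk)
          simpa [pvNet_cons_other c _ hc1 hc2] using this

-- if B's stack over the first k characters has top 0, then s starts with '(' and expr[1:k] is balanced
theorem pvStk_zero_top (s : List Char) (k : Nat) (rest : List Int)
    (h : pvStk s k = 0 :: rest) :
    1 ≤ k ∧ s.getD 0 ' ' = '(' ∧ pvNet ((s.take k).drop 1) = 0 ∧
      ∀ j : Nat, j ≤ ((s.take k).drop 1).length → 0 ≤ pvNet (((s.take k).drop 1).take j) := by
  rw [pvStk_eq_stkF] at h
  cases k with
  | zero => simp [pvStkF] at h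
  | succ k' =>
    cases s with
    | nil => simp [pvStkF] at h
    | cons c₀ s' =>
      simp only [List.take_succ_cons, List.drop_one, List.tail_cons]
      by_cases hc1 : c₀ = '('
      · subst hc1
        have hstep : pvStackStep [] ((0 : Int), '(') = [] ++ [(0 : Int)] := by
          simp [pvStackStep]
        simp only [List.take_succ_cons, pvStkF, zero_add, hstep] at h
        obtain ⟨h1, h2⟩ := pvStkF_zero_head (s'.take k') 1 [] rest (by omega) (by simp) h
        simp only [List.length_nil, Nat.cast_zero, zero_add] at h1 h2
        exact ⟨by omega, rfl, h1, h2⟩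
      · have hstep0 : pvStackStep [] ((0 : Int), c₀) = [] := by
          by_cases hc2 : c₀ = ')' <;> simp [pvStackStep, hc1, hc2]
        simp only [List.take_succ_cons, pvStkF, zero_add, hstep0] at h
        have : (0 : Int) ∈ pvStkF (s'.take k') 1 [] := by rw [h]; exact List.mem_cons_self ..
        rcases pvStkF_mem (s'.take k') 1 [] 0 this with h' | h'
        · exact absurd h' (List.not_mem_nil)
        · omega

-- if s starts with '(' and expr[1:k] is balanced, B's stack over the first k characters is [0]
theorem pvStk_of_balanced (s : List Char) (k : Nat) (hk1 : 1 ≤ k)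
    (hc : s.getD 0 ' ' = '(') (hne : s ≠ [])
    (hnet : pvNet ((s.take k).drop 1) = 0)
    (hpre : ∀ j : Nat, j ≤ ((s.take k).drop 1).length → 0 ≤ pvNet (((s.take k).drop 1).take j)) :
    pvStk s k = [0] := by
  rw [pvStk_eq_stkF]
  cases s with
  | nil => exact absurd rfl hne
  | cons c₀ s' =>
    cases k with
    | zero => omega
    | succ k' =>
      simp only [List.getD_cons_zero] at hc
      subst hc
      simp only [List.take_succ_cons, List.drop_one, List.tail_cons] at hnet hpre
      have hstep : pvStackStep [] ((0 : Int), '(') = [] ++ [(0 : Int)] := by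
        simp [pvStackStep]
      simp only [List.take_succ_cons, pvStkF, zero_add, hstep]
      obtain ⟨ex', heq, hlen⟩ := pvStkF_balanced (s'.take k') 1 [] [0] (by
        intro j hj
        simpa using hpre j hj)
      rw [heq]
      have : ex' = [] := by
        simp only [List.length_nil, Nat.cast_zero, zero_add, hnet] at hlen
        exact List.eq_nil_of_length_eq_zero (by omega)
      simp [this]

theorem pv_ofList_ne_empty (l : List Char) (h : l ≠ []) : String.ofList l ≠ "" := by
  intro hcontra
  have : (String.ofList l).toList = ("" : String).toList := by rw [hcontra]
  simp at this
  exact h this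

-- ===== VERDICT (by name: the statement is the Claim_ definition above) =====
theorem extract_operand_spec : Claim_unchanged_extract_operand := by
  intro expr pos _ hpre
  unfold Spec_extract_operand
  intro hD
  unfold extract_operand extract_operand_alt
  by_cases h0 : pos ≤ 0
  · simp [h0]
  · rw [if_neg h0, if_neg h0]
    set s := expr.toList with hs
    by_cases hc : PySem.List.pyGetD s (pos - 1) ' ' = ')'
    · rw [if_pos hc, if_neg (not_not_intro hc)]
      -- the ')' branch
      have hpos1 : 1 ≤ pos := by omega
      set k : Nat := (pos - 1).toNat with hkdef
      have hk1 : (k : Int) = pos - 1 := by omega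
      have hklen : k ≤ s.length := by
        have : pos ≤ (s.length : Int) := hpre
        omega
      have hslice : PySem.List.slice s none (some (pos - 1)) = s.take k := by
        rw [← hk1, PySem.List.slice_to_natCast]
      have hstack : (PySem.List.enumerate (PySem.List.slice s none (some (pos - 1)))).foldl pvStackStep []
          = pvStk s k := by rw [hslice]; rfl
      have hbs : pvBackScan s (pos - 2) 1 =
          (match (pvStk s k)[0]? with
           | some t => t - 1
           | none => (-1 : Int)) := by
        have : pos - 2 = (k : Int) - 1 := by omega
        rw [this]
        simpa using pvBackScan_eq_stk s k hklen 1 le_rfl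
      rw [hstack, hbs]
      cases hS : pvStk s k with
      | nil => simp
      | cons t rest =>
        have ht0 : 0 ≤ t := pvStk_nonneg s k t (by rw [hS]; exact List.mem_cons_self ..)
        simp only [List.getElem?_cons_zero]
        by_cases htz : t = 0
        · -- A reports "unbalanced"; outside D_ this forces pos = 2 and the operand "()"
          subst htz
          rw [if_pos (by omega : (0 : Int) - 1 < 0)]
          obtain ⟨hk1', hopen, hnet, hprefix⟩ := pvStk_zero_top s k rest hS
          have hpos2 : pos = 2 := by
            by_contra hne2
            exact hD ⟨by omega, hpre, hne2, hc,
              by rw [PySem.List.pyGetD_zero]; exact hopen, hnet,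
              fun j hj => hprefix j (Nat.lt_succ_iff.mp (List.mem_range.mp hj))⟩
          subst hpos2
          -- s starts with '(' and s[1] = ')', so the operand is "()" and B strips it to ""
          have hlen2 : 2 ≤ s.length := by
            have h2 : (2 : Int) ≤ (s.length : Int) := hpre
            omega
          match s, hlen2 with
          | c₀ :: c₁ :: s'', _ =>
            simp only [List.getD_cons_zero] at hopen
            subst hopen
            have hc₁ : c₁ = ')' := by
              have : PySem.List.pyGetD ('(' :: c₁ :: s'') ((2 : Int) - 1) ' ' = c₁ := by
                norm_num [PySem.List.pyGetD, PySem.List.pyIdx?]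
              rw [this] at hc
              exact hc
            subst hc₁
            have hop : PySem.List.slice ('(' :: ')' :: s'') (some (0 : Int)) (some (2 : Int))
                = ['(', ')'] := by
              rw [PySem.List.slice_toNat _ (by omega) (by omega)]
              rfl
            rw [hop]
            decide
        · rw [if_neg (by omega : ¬ t - 1 < 0)]
          have hadd : t - 1 + 1 = t := by ring
          rw [hadd]
          set operand := PySem.List.slice s (some t) (some pos) with hop
          by_cases hin : PySem.Chars.isIn ['|', '_', ')'] operand = true
          · rw [if_pos hin, if_pos hin]
          · rw [if_neg hin, if_neg hin]
            by_cases hsw : (PySem.Chars.startswith operand ['('] && PySem.Chars.endswith operand [')']) = true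
            · rw [if_pos hsw]
              by_cases hbal : pvInnerBal (PySem.List.slice operand (some 1) (some (-1))) 0 = 0
              · have hbalB := (pvBalancedB_eq_innerBal (PySem.List.slice operand (some 1) (some (-1))) 0 le_rfl).2 hbal
                rw [if_pos hbal, if_pos (by
                  simp only [Bool.and_eq_true] at hsw ⊢
                  exact ⟨hsw, hbalB⟩)]
              · rw [if_neg hbal, if_neg (by
                  simp only [Bool.and_eq_true]
                  rintro ⟨-, hb⟩
                  exact hbal ((pvBalancedB_eq_innerBal _ 0 le_rfl).1 hb))]
            · rw [if_neg hsw, if_neg (by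
                simp only [Bool.and_eq_true]
                rintro ⟨hse, -⟩
                exact hsw (by simp only [Bool.and_eq_true]; exact hse))]
    · rw [if_neg hc, if_pos hc]

theorem extract_operand_changed : Claim_changed_extract_operand := by
  unfold Claim_changed_extract_operand
  refine ⟨by decide, by decide, by decide, ?_, by decide, by decide⟩
  show extract_operand "(ab)" 4 = ("", 0)
  have hbs : pvBackScan "(ab)".toList (4 - 2) 1 = -1 := by
    rw [show ((4 : Int) - 2) = ((3 : Nat) : Int) - 1 by norm_num,
      pvBackScan_eq_stk "(ab)".toList 3 (by decide) 1 le_rfl]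
    decide
  simp only [extract_operand, hbs]
  decide

theorem extract_operand_tight : Claim_exact_extract_operand := by
  intro expr pos _ hpre hD
  obtain ⟨hp0, hplen, hp2, hclose, hopen, hnet, hprefix⟩ := hD
  set s := expr.toList with hs
  -- pos = 1 is impossible: expr[0] would have to be both ')' and '('
  have hp3 : 3 ≤ pos := by
    rcases (by omega : pos = 1 ∨ 3 ≤ pos) with h1 | h3
    · rw [h1, show (1 : Int) - 1 = 0 from by norm_num] at hclose
      rw [hclose] at hopen
      exact absurd hopen (by decide)
    · exact h3
  unfold extract_operand extract_operand_alt
  rw [if_neg (by omega : ¬ pos ≤ 0), if_neg (by omega : ¬ pos ≤ 0),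
    if_pos hclose, if_neg (not_not_intro hclose)]
  set k : Nat := (pos - 1).toNat with hkdef
  have hklen : k ≤ s.length := by
    have : pos ≤ (s.length : Int) := hplen
    omega
  have hsne : s ≠ [] := by
    intro hnil
    rw [hnil] at hklen
    simp at hklen
    omega
  have hslice : PySem.List.slice s none (some (pos - 1)) = s.take k := by
    rw [show pos - 1 = ((k : Nat) : Int) by omega, PySem.List.slice_to_natCast]
  have hstack : (PySem.List.enumerate (PySem.List.slice s none (some (pos - 1)))).foldl pvStackStep []
      = pvStk s k := by rw [hslice]; rfl
  have hstk : pvStk s k = [0] := by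
    refine pvStk_of_balanced s k (by omega) ?_ hsne hnet ?_
    · rw [← PySem.List.pyGetD_zero]; exact hopen
    · intro j hj
      exact hprefix j (List.mem_range.mpr (by omega))
  have hbs : pvBackScan s (pos - 2) 1 = -1 := by
    rw [show pos - 2 = ((k : Nat) : Int) - 1 by omega,
      pvBackScan_eq_stk s k hklen 1 le_rfl, hstk]
    rfl
  rw [hstack, hbs, hstk, if_pos (by omega : (-1 : Int) < 0)]
  -- A returns ("", 0); B returns a nonempty operand starting at 0
  simp only []
  set operand := PySem.List.slice s (some (0 : Int)) (some pos) with hop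
  have hoplen : operand.length = pos.toNat := by
    rw [hop, PySem.List.slice_toNat _ (by omega) (by omega)]
    simp only [Int.toNat_zero, List.drop_zero, List.length_take]
    omega
  have hops : 3 ≤ operand.length := by omega
  intro hcontra
  by_cases hin : PySem.Chars.isIn ['|', '_', ')'] operand = true
  · rw [if_pos hin] at hcontra
    have := congrArg Prod.fst hcontra
    exact pv_ofList_ne_empty operand (by intro h; rw [h] at hops; simp at hops) this.symm
  · rw [if_neg hin] at hcontra
    by_cases hsw : (PySem.Chars.startswith operand ['('] && PySem.Chars.endswith operand [')'] &&
        pvBalancedB (PySem.List.slice operand (some 1) (some (-1))) 0) = true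
    · rw [if_pos hsw] at hcontra
      have := congrArg Prod.fst hcontra
      refine pv_ofList_ne_empty _ ?_ this.symm
      intro h
      have hlen := congrArg List.length h
      rw [PySem.List.length_slice] at hlen
      simp only [List.length_nil] at hlen
      rw [PySem.List.clampIdx_neg_one] at hlen
      have h1 : PySem.List.clampIdx operand.length 1 = 1 := by
        rw [show (1 : Int) = ((1 : Nat) : Int) from rfl, PySem.List.clampIdx_natCast]
        omega
      rw [h1] at hlen
      omega
    · rw [if_neg hsw] at hcontra
      have := congrArg Prod.fst hcontra
      exact pv_ofList_ne_empty operand (by intro h; rw [h] at hops; simp at hops) this.symm
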